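-- pv_equiv track=rewrite | github.com/Amrokahla/Bot-Framework | core/bot/message_handler.py | _get_minimum_role
-- ===== SOURCE A (Python) =====
-- def _get_minimum_role(allowed_roles):
--     """
--     Determine the minimum role required based on allowed_roles list.
--
--     Args:
--         allowed_roles: List of allowed roles (e.g., ["admin", "superadmin"] or ["all"])
--
--     Returns:
--         str or None: Minimum role required (None means no restriction)
--     """
--     if not allowed_roles:
--         return "admin"  # Default to admin if not specified
--
--     # If "all" is in allowed_roles, no role restriction
--     if "all" in allowed_roles:
--         return None
--
--     # Role hierarchy: superadmin > admin > user
--     role_hierarchy = {"user": 1, "admin": 2, "superadmin": 3}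
--
--     # Find the lowest role in the hierarchy
--     min_level = float('inf')
--     min_role = "admin"
--
--     for role in allowed_roles:
--         role_lower = role.lower()
--         if role_lower in role_hierarchy:
--             level = role_hierarchy[role_lower]
--             if level < min_level:
--                 min_level = level
--                 min_role = role_lower
--
--     return min_role
-- ===== SOURCE B (Python) =====
-- def _get_minimum_role(allowed_roles):
--     if not allowed_roles:
--         return "admin"
--     if "all" in allowed_roles:
--         return None
--     present = {r.lower() for r in allowed_roles}
--     for name in ("user", "admin", "superadmin"):
--         if name in present:
--             return name
--     return "admin"
-- ===== Notes on version B (the rewrite author's own statement) =====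
-- stated objective: simpler
-- what changed: Instead of scanning the input while tracking a running minimum level against an infinity sentinel, B builds a set of lowered role names once and returns the first name of the fixed hierarchy, taken in ascending level order, that occurs in the set, falling back to the default role.
import Mathlib
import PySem

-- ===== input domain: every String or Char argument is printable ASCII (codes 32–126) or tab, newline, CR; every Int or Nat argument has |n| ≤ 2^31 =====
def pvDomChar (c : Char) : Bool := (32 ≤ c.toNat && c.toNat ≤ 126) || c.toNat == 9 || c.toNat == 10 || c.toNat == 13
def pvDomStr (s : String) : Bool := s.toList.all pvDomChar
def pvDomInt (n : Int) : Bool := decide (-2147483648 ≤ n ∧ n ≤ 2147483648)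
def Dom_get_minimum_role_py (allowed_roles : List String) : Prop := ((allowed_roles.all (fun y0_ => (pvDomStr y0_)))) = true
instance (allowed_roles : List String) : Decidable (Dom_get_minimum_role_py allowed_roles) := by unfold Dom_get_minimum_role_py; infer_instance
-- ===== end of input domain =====

-- B replaces A's running-minimum scan (with a float-infinity sentinel) by a lowered-name set
-- plus a first-match scan of the fixed ascending hierarchy; objective: simpler.


-- ===== PORT A =====
-- role_hierarchy = {"user": 1, "admin": 2, "superadmin": 3}
def pvHierA : PySem.Dict String Int := PySem.Dict.ofList [("user", 1), ("admin", 2), ("superadmin", 3)]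

-- loop body: min_level is Option Int with none = float('inf') (levels are ints; 'level < inf' is always true,
-- so the Option encoding is exact here)
def pvStepA (st : Option Int × String) (role : String) : Option Int × String :=
  let role_lower := PySem.Str.lower role
  match pvHierA.get? role_lower with
  | none => st
  | some level =>
    match st.1 with
    | none => (some level, role_lower)
    | some m => if level < m then (some level, role_lower) else st

def get_minimum_role_py (allowed_roles : List String) : Option String :=
  if allowed_roles = [] then some "admin"
  else if allowed_roles.contains "all" then none
  else some (allowed_roles.foldl pvStepA (none, "admin")).2

-- ===== PORT B =====
def get_minimum_role_py_alt (allowed_roles : List String) : Option String :=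
  if allowed_roles = [] then some "admin"
  else if allowed_roles.contains "all" then none
  else
    let present : PySem.Set String := PySem.Set.ofList (allowed_roles.map PySem.Str.lower)
    some ((["user", "admin", "superadmin"].find? (fun name => PySem.Set.contains present name)).getD "admin")

-- ===== PRECONDITION & SPEC =====
def Spec_get_minimum_role_py (allowed_roles : List String) (out : Option String) : Prop := out = get_minimum_role_py_alt allowed_roles
instance (allowed_roles : List String) (out : Option String) : Decidable (Spec_get_minimum_role_py allowed_roles out) := by unfold Spec_get_minimum_role_py; infer_instance

-- ===== CLAIM (what is proved, stated in full; the proofs are below) =====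
def Claim_equal_get_minimum_role_py : Prop := ∀ (allowed_roles : List String), Dom_get_minimum_role_py allowed_roles → Spec_get_minimum_role_py allowed_roles (get_minimum_role_py allowed_roles)

-- ===== LEMMAS AND PROOFS =====

-- view of the sentinel: none = ∞ encoded as 4 (levels are 1..3)
def pvLvl (m : Option Int) : Int := m.getD 4

-- does xs contain a role whose lowering is s?
def pvHas (s : String) (xs : List String) : Bool := xs.any (fun x => PySem.Str.lower x = s)

theorem pvHierA_get (l : String) :
    pvHierA.get? l = if l = "user" then some 1 else if l = "admin" then some 2
      else if l = "superadmin" then some 3 else none := by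
  by_cases h1 : l = "user"
  · subst h1; decide
  · by_cases h2 : l = "admin"
    · subst h2; decide
    · by_cases h3 : l = "superadmin"
      · subst h3; decide
      · have hmk : pvHierA = PySem.Dict.mk [("user", 1), ("admin", 2), ("superadmin", 3)] := by decide
        rw [hmk]
        simp [h1, h2, h3, Ne.symm, PySem.Dict.get?]

theorem pvFoldA_char (xs : List String) : ∀ (m : Option Int) (r : String), pvLvl m ≤ 4 →
    xs.foldl pvStepA (m, r) =
      (if pvHas "user" xs ∧ 1 < pvLvl m then (some 1, "user")
       else if pvHas "admin" xs ∧ 2 < pvLvl m then (some 2, "admin")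
       else if pvHas "superadmin" xs ∧ 3 < pvLvl m then (some 3, "superadmin")
       else (m, r)) := by
  induction xs with
  | nil => intro m r _; simp [pvHas]
  | cons x xs ih =>
    intro m r hm
    rw [List.foldl_cons]
    by_cases h1 : PySem.Str.lower x = "user"
    · have hstep : pvStepA (m, r) x = if 1 < pvLvl m then (some 1, "user") else (m, r) := by
        simp only [pvStepA, h1, pvHierA_get, if_pos rfl]
        cases m <;> simp [pvLvl]
      rw [hstep]
      by_cases hc : 1 < pvLvl m
      · rw [if_pos hc, ih (some 1) "user" (by simp [pvLvl])]
        simp only [pvLvl] at *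
        by_cases hu : ∃ y ∈ xs, PySem.Str.lower y = "user" <;>
            by_cases ha : ∃ y ∈ xs, PySem.Str.lower y = "admin" <;>
              by_cases hsx : ∃ y ∈ xs, PySem.Str.lower y = "superadmin" <;>
                simp [pvHas, h1, hu, ha, hsx, hc] <;>
                  (intros; first | rfl | omega | (exfalso; omega))
      · rw [if_neg hc, ih m r hm]
        simp only [pvLvl] at *
        by_cases hu : ∃ y ∈ xs, PySem.Str.lower y = "user" <;>
            by_cases ha : ∃ y ∈ xs, PySem.Str.lower y = "admin" <;>
              by_cases hsx : ∃ y ∈ xs, PySem.Str.lower y = "superadmin" <;>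
                simp [pvHas, h1, hu, ha, hsx, hc] <;>
                  (intros; first | rfl | omega | (exfalso; omega))
    · by_cases h2 : PySem.Str.lower x = "admin"
      · have hstep : pvStepA (m, r) x = if 2 < pvLvl m then (some 2, "admin") else (m, r) := by
          simp only [pvStepA, h2, pvHierA_get, if_pos rfl]
          simp only [show ¬("admin" = "user") by decide, if_false, if_pos rfl]
          cases m <;> simp [pvLvl]
        rw [hstep]
        by_cases hc : 2 < pvLvl m
        · rw [if_pos hc, ih (some 2) "admin" (by simp [pvLvl])]
          simp only [pvLvl] at *
          by_cases hu : ∃ y ∈ xs, PySem.Str.lower y = "user" <;>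
            by_cases ha : ∃ y ∈ xs, PySem.Str.lower y = "admin" <;>
              by_cases hsx : ∃ y ∈ xs, PySem.Str.lower y = "superadmin" <;>
                simp [pvHas, h1, h2, hu, ha, hsx, hc] <;>
                  (intros; first | rfl | omega | (exfalso; omega))
        · rw [if_neg hc, ih m r hm]
          simp only [pvLvl] at *
          by_cases hu : ∃ y ∈ xs, PySem.Str.lower y = "user" <;>
            by_cases ha : ∃ y ∈ xs, PySem.Str.lower y = "admin" <;>
              by_cases hsx : ∃ y ∈ xs, PySem.Str.lower y = "superadmin" <;>
                simp [pvHas, h1, h2, hu, ha, hsx, hc] <;>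
                  (intros; first | rfl | omega | (exfalso; omega))
      · by_cases h3 : PySem.Str.lower x = "superadmin"
        · have hstep : pvStepA (m, r) x = if 3 < pvLvl m then (some 3, "superadmin") else (m, r) := by
            simp only [pvStepA, h3, pvHierA_get, if_pos rfl]
            simp only [show ¬("superadmin" = "user") by decide,
              show ¬("superadmin" = "admin") by decide, if_false, if_pos rfl]
            cases m <;> simp [pvLvl]
          rw [hstep]
          by_cases hc : 3 < pvLvl m
          · rw [if_pos hc, ih (some 3) "superadmin" (by simp [pvLvl])]
            simp only [pvLvl] at *
            by_cases hu : ∃ y ∈ xs, PySem.Str.lower y = "user" <;>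
            by_cases ha : ∃ y ∈ xs, PySem.Str.lower y = "admin" <;>
              by_cases hsx : ∃ y ∈ xs, PySem.Str.lower y = "superadmin" <;>
                simp [pvHas, h1, h2, h3, hu, ha, hsx, hc] <;>
                  (intros; first | rfl | omega | (exfalso; omega))
          · rw [if_neg hc, ih m r hm]
            simp only [pvLvl] at *
            by_cases hu : ∃ y ∈ xs, PySem.Str.lower y = "user" <;>
            by_cases ha : ∃ y ∈ xs, PySem.Str.lower y = "admin" <;>
              by_cases hsx : ∃ y ∈ xs, PySem.Str.lower y = "superadmin" <;>
                simp [pvHas, h1, h2, h3, hu, ha, hsx, hc] <;>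
                  (intros; first | rfl | omega | (exfalso; omega))
        · have hstep : pvStepA (m, r) x = (m, r) := by
            simp [pvStepA, pvHierA_get, h1, h2, h3]
          rw [hstep, ih m r hm]
          simp [pvHas, h1, h2, h3]

theorem pvPresent_has (xs : List String) (s : String) :
    PySem.Set.contains (PySem.Set.ofList (xs.map PySem.Str.lower)) s = pvHas s xs := by
  simp only [pvHas]
  rw [Bool.eq_iff_iff, PySem.Set.contains_iff, PySem.Set.mem_ofList]
  simp only [List.mem_map, List.any_eq_true, decide_eq_true_eq]

theorem get_minimum_role_py_spec : Claim_equal_get_minimum_role_py := by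
  intro xs _
  unfold Spec_get_minimum_role_py get_minimum_role_py get_minimum_role_py_alt
  split_ifs with he hall
  · rfl
  · rfl
  · rw [pvFoldA_char xs none "admin" (by simp [pvLvl])]
    simp only [List.find?, pvPresent_has]
    by_cases hu : (xs.any fun x => decide (PySem.Str.lower x = "user")) = true <;>
      by_cases ha : (xs.any fun x => decide (PySem.Str.lower x = "admin")) = true <;>
        by_cases hs : (xs.any fun x => decide (PySem.Str.lower x = "superadmin")) = true <;>
          simp only [Bool.not_eq_true] at hu ha hs <;>
            simp [pvHas, hu, ha, hs, pvLvl]
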